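-- pv_equiv track=rewrite | github.com/fuscadan/Insight | nba_smart_database/features.py | n_numbers
-- ===== SOURCE A (Python) =====
-- def n_numbers(paragraph):
--     # Count the number of numbers (word or digits) appearing in paragraph
--     number_words = ['one','two','three','four',
--         'five','six','seven','eight','nine']
--     n_num = len([s for s in paragraph.split()
--                     if s.isdigit() or s in number_words])
--
--     # count the number of strings of the form "125-536" (game scores)
--     possible_scores = [s for s in paragraph.split() if '-' in s]
--     n_scores = len([s for s in possible_scores
--                     if 2 == len([i for i in s.split('-') if i.isdigit()])])
--
--     return n_num + n_scores
-- ===== SOURCE B (Python) =====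
-- NUMBER_WORDS = ('one', 'two', 'three', 'four', 'five', 'six', 'seven', 'eight', 'nine')
--
-- def n_numbers(paragraph):
--     # Character-level scan: classify each whitespace-delimited token on the fly
--     # (digit run / number word / score pattern) without ever calling split().
--     total = 0
--     buf = []        # characters of the current token
--     dash = False    # current token contains '-'
--     dp = 0          # closed '-'-separated parts that are nonempty and all digits
--     plen = 0        # length of the current '-'-part
--     pok = True      # current '-'-part is all digits so far
--     for ch in paragraph + ' ':
--         if ch.isspace():
--             if buf:
--                 if pok and 0 < plen:
--                     dp += 1
--                 if (not dash and dp == 1) or ''.join(buf) in NUMBER_WORDS: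
--                     total += 1
--                 if dash and dp == 2:
--                     total += 1
--             buf = []
--             dash = False
--             dp = 0
--             plen = 0
--             pok = True
--         else:
--             buf.append(ch)
--             if ch == '-':
--                 dash = True
--                 if pok and 0 < plen:
--                     dp += 1
--                 plen = 0
--                 pok = True
--             else:
--                 plen += 1
--                 if not ch.isdigit():
--                     pok = False
--     return total
-- ===== Notes on version B (the rewrite author's own statement) =====
-- stated objective: alternative
-- what changed: B is a single character-level finite-state scan that tokenizes and classifies each token on the fly (digit-run/number-word/score state per token), replacing A's three split() passes, per-token dash splitting and two comprehension scans over token lists.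
import Mathlib
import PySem

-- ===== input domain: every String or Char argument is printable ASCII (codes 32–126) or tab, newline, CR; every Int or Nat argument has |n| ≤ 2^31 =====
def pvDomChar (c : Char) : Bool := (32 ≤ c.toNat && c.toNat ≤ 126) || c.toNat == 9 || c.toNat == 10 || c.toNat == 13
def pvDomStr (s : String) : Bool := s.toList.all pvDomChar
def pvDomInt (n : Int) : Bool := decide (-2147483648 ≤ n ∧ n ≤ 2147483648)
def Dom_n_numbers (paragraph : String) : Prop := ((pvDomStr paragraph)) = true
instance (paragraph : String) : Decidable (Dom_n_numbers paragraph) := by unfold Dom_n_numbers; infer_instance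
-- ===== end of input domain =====

-- B replaces A's token-list machinery (three split() calls, per-token dash splitting, two
-- comprehension scans) by a single character-level scan that classifies each token on the
-- fly (objective: alternative algorithm; same asymptotic cost).

-- ===== PORT A =====
def pvNumberWords : List String :=
  ["one", "two", "three", "four", "five", "six", "seven", "eight", "nine"]

def n_numbers (paragraph : String) : Int :=
  let n_num : Int := PySem.List.len ((PySem.Str.split₀ paragraph).filter
      (fun s => PySem.Str.strIsdigit s || pvNumberWords.contains s))
  let possible_scores : List String :=
    (PySem.Str.split₀ paragraph).filter (fun s => PySem.Str.isIn "-" s)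
  let n_scores : Int := PySem.List.len (possible_scores.filter
      (fun s => (2 : Int) == PySem.List.len ((PySem.Chars.splitOn s.toList ['-']).filter
                  (fun i => PySem.Chars.strIsdigit i))))
  n_num + n_scores

-- ===== PORT B =====
-- Source B's NUMBER_WORDS; ''.join(buf) in NUMBER_WORDS is membership of the char list buf here
def pvWordsChars : List (List Char) :=
  [['o','n','e'], ['t','w','o'], ['t','h','r','e','e'], ['f','o','u','r'],
   ['f','i','v','e'], ['s','i','x'], ['s','e','v','e','n'], ['e','i','g','h','t'],
   ['n','i','n','e']]

-- the scanner's state: Source B's variables total, buf, dash, dp, plen, pok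
structure PvSt where
  total : Int
  buf   : List Char
  dash  : Bool
  dp    : Int
  plen  : Int
  pok   : Bool
deriving DecidableEq, Repr

-- one iteration of Source B's for-loop body
def pvStep (st : PvSt) (ch : Char) : PvSt :=
  if PySem.Chars.isspace ch then
    if st.buf.isEmpty then
      ⟨st.total, [], false, 0, 0, true⟩
    else
      let dp := if st.pok && decide (0 < st.plen) then st.dp + 1 else st.dp
      let t1 := if (!st.dash && (dp == 1)) || pvWordsChars.contains st.buf
                then st.total + 1 else st.total
      let t2 := if st.dash && (dp == 2) then t1 + 1 else t1
      ⟨t2, [], false, 0, 0, true⟩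
  else
    let buf := st.buf ++ [ch]
    if ch == '-' then
      let dp := if st.pok && decide (0 < st.plen) then st.dp + 1 else st.dp
      ⟨st.total, buf, true, dp, 0, true⟩
    else
      ⟨st.total, buf, st.dash, st.dp, st.plen + 1, st.pok && PySem.Chars.isdigit ch⟩

-- 'for ch in paragraph + " "' iterates the characters of paragraph followed by a space
def n_numbers_alt (paragraph : String) : Int :=
  ((paragraph.toList ++ [' ']).foldl pvStep ⟨0, [], false, 0, 0, true⟩).total

-- ===== PRECONDITION & SPEC =====
def Spec_n_numbers (paragraph : String) (out : Int) : Prop := out = n_numbers_alt paragraph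
instance (paragraph : String) (out : Int) : Decidable (Spec_n_numbers paragraph out) := by unfold Spec_n_numbers; infer_instance

-- ===== CLAIM (what is proved, stated in full; the proofs are below) =====
def Claim_equal_n_numbers : Prop := ∀ (paragraph : String), Dom_n_numbers paragraph → Spec_n_numbers paragraph (n_numbers paragraph)

-- ===== LEMMAS AND PROOFS =====

-- A's two token predicates (as they appear in A's filters)
def pvP1 (s : String) : Bool :=
  PySem.Str.strIsdigit s || pvNumberWords.contains s

def pvP2 (s : String) : Bool :=
  PySem.Str.isIn "-" s &&
    ((2 : Int) == PySem.List.len ((PySem.Chars.splitOn s.toList ['-']).filter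
        (fun i => PySem.Chars.strIsdigit i)))

-- the same predicates at the character-list level
def pvQ1 (t : List Char) : Bool :=
  PySem.Chars.strIsdigit t || pvWordsChars.contains t

def pvQ2 (t : List Char) : Bool :=
  PySem.Chars.isIn ['-'] t &&
    ((2 : Int) == PySem.List.len ((PySem.Chars.splitOn t ['-']).filter
        (fun i => PySem.Chars.strIsdigit i)))

-- weight one token contributes to A's answer
def pvW (t : List Char) : Int :=
  (if pvQ1 t then 1 else 0) + (if pvQ2 t then 1 else 0)

-- the (dp, plen, pok) part of the scanner, as a fold over the token's characters
def pvPartStep : Int × Int × Bool → Char → Int × Int × Bool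
  | (dp, plen, pok), c =>
    if c == '-' then (if pok && decide (0 < plen) then dp + 1 else dp, 0, true)
    else (dp, plen + 1, pok && PySem.Chars.isdigit c)

def pvClose : Int × Int × Bool → Int
  | (dp, plen, pok) => if pok && decide (0 < plen) then dp + 1 else dp

def pvPartsOf (b : List Char) : Int × Int × Bool := b.foldl pvPartStep (0, 0, true)

def pvDashOf (b : List Char) : Bool := b.contains '-'

-- canonical scanner state mid-token, token-so-far b
def pvMk (total : Int) (b : List Char) : PvSt :=
  ⟨total, b, pvDashOf b, (pvPartsOf b).1, (pvPartsOf b).2.1, (pvPartsOf b).2.2⟩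

lemma pvCond (cur : List Char) :
    (cur.all PySem.Chars.isdigit && decide (0 < (cur.length : Int)))
      = PySem.Chars.strIsdigit cur.reverse := by
  rcases cur with _ | ⟨c, cs⟩
  · simp [PySem.Chars.strIsdigit]
  · by_cases h1 : PySem.Chars.isdigit c = true <;>
      by_cases h2 : cs.all PySem.Chars.isdigit = true <;>
      simp [PySem.Chars.strIsdigit, h1, h2]

lemma pvCloseEq (cur : List Char) (dp : Int) :
    pvClose (dp, (cur.length : Int), cur.all PySem.Chars.isdigit)
      = if PySem.Chars.strIsdigit cur.reverse = true then dp + 1 else dp := by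
  simp only [pvClose]; rw [pvCond]

lemma pvPartDash (cur : List Char) (dp : Int) :
    pvPartStep (dp, (cur.length : Int), cur.all PySem.Chars.isdigit) '-'
      = (if PySem.Chars.strIsdigit cur.reverse = true then dp + 1 else dp, 0, true) := by
  simp only [pvPartStep, beq_self_eq_true, if_true]; rw [pvCond]

lemma pvPartNonDash (cur : List Char) (dp : Int) (c : Char) (hc : ¬ c = '-') :
    pvPartStep (dp, (cur.length : Int), cur.all PySem.Chars.isdigit) c
      = (dp, ((c :: cur).length : Int), (c :: cur).all PySem.Chars.isdigit) := by
  simp only [pvPartStep]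
  rw [if_neg (by simp [hc])]
  simp [Bool.and_comm]

-- digit-part count of splitOn.go, tracked by the (dp, plen, pok) fold
lemma pvSplitCount : ∀ (l : List Char) (fuel : Nat), l.length < fuel →
    ∀ (cur : List Char) (acc : List (List Char)) (dp : Int),
    ((PySem.Chars.splitOn.go ['-'] fuel l cur acc).countP PySem.Chars.strIsdigit : Int)
      = (acc.countP PySem.Chars.strIsdigit : Int) - dp
        + pvClose (l.foldl pvPartStep (dp, (cur.length : Int), cur.all PySem.Chars.isdigit)) := by
  intro l
  induction l with
  | nil =>
      intro fuel h cur acc dp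
      match fuel, h with
      | fuel + 1, _ =>
        rw [List.foldl_nil, pvCloseEq]
        simp only [PySem.Chars.splitOn.go, List.countP_reverse, List.countP_cons]
        by_cases hd : PySem.Chars.strIsdigit cur.reverse = true <;> simp [hd] <;> omega
  | cons c rest ih =>
      intro fuel h cur acc dp
      match fuel, h with
      | fuel + 1, h =>
        have h' : rest.length < fuel := by simpa using h
        rw [List.foldl_cons]
        by_cases hc : c = '-'
        · subst hc
          rw [pvPartDash]
          simp only [PySem.Chars.splitOn.go]
          rw [if_pos (by simp [List.isPrefixOf] : List.isPrefixOf ['-'] ('-' :: rest) = true)]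
          simp only [List.length_singleton, List.drop_succ_cons, List.drop_zero]
          have := ih fuel h' [] (cur.reverse :: acc)
            (if PySem.Chars.strIsdigit cur.reverse = true then dp + 1 else dp)
          simp only [List.length_nil, Nat.cast_zero, List.all_nil] at this
          rw [this]
          simp only [List.countP_cons]
          by_cases hd : PySem.Chars.strIsdigit cur.reverse = true <;> simp [hd] <;> omega
        · rw [pvPartNonDash cur dp c hc]
          simp only [PySem.Chars.splitOn.go]
          rw [if_neg (by simp [List.isPrefixOf]; exact fun hx => absurd hx.symm hc)]
          rw [ih fuel h' (c :: cur) acc dp]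

lemma pvSplitCount' (b : List Char) :
    ((PySem.Chars.splitOn b ['-']).countP PySem.Chars.strIsdigit : Int)
      = pvClose (pvPartsOf b) := by
  have h := pvSplitCount b (b.length + 1) (Nat.lt_succ_self _) [] [] 0
  simp only [List.length_nil, Nat.cast_zero, List.all_nil, List.countP_nil] at h
  simpa [pvPartsOf] using h

lemma pvSplitNoDash : ∀ (l : List Char) (fuel : Nat), l.length < fuel →
    ∀ (cur : List Char) (acc : List (List Char)), ('-' : Char) ∉ l →
    PySem.Chars.splitOn.go ['-'] fuel l cur acc = ((cur.reverse ++ l) :: acc).reverse := by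
  intro l
  induction l with
  | nil =>
      intro fuel h cur acc _
      match fuel, h with
      | fuel + 1, _ => simp [PySem.Chars.splitOn.go]
  | cons c rest ih =>
      intro fuel h cur acc hd
      match fuel, h with
      | fuel + 1, h =>
        have h' : rest.length < fuel := by simpa using h
        have hc : ¬ c = '-' := fun hx => hd (hx ▸ List.mem_cons_self)
        simp only [PySem.Chars.splitOn.go]
        rw [if_neg (by simp [List.isPrefixOf]; exact fun hx => absurd hx.symm hc)]
        rw [ih fuel h' (c :: cur) acc (fun hx => hd (List.mem_cons_of_mem c hx))]
        simp

lemma pvSplitNoDash' (b : List Char) (h : ('-' : Char) ∉ b) :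
    PySem.Chars.splitOn b ['-'] = [b] := by
  have := pvSplitNoDash b (b.length + 1) (Nat.lt_succ_self _) [] [] h
  simpa using this

lemma pvNoDashWords : ∀ w ∈ pvWordsChars, ('-' : Char) ∉ w := by decide

lemma pvIsInDash (b : List Char) : PySem.Chars.isIn ['-'] b = b.contains '-' := by
  rw [Bool.eq_iff_iff]
  simp [PySem.Chars.isIn_iff_infix, List.singleton_infix_iff]

lemma pvStrIsdigitDash (b : List Char) (h : ('-' : Char) ∈ b) :
    PySem.Chars.strIsdigit b = false := by
  simp only [PySem.Chars.strIsdigit]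
  have : b.all PySem.Chars.isdigit = false := by
    rw [List.all_eq_false]; exact ⟨'-', h, by decide⟩
  simp [this]

lemma pvBeqComm (a b : Int) : (a == b) = (b == a) := by
  rw [Bool.eq_iff_iff]; constructor <;> (intro h; simp only [beq_iff_eq] at *; omega)

-- the boundary bump equals A's token weight
lemma pvBump (b : List Char) (hb : ¬ b = []) (total : Int) :
    (let dp := pvClose (pvPartsOf b);
     let t1 := if (!pvDashOf b && (dp == 1)) || pvWordsChars.contains b
               then total + 1 else total;
     if pvDashOf b && (dp == 2) then t1 + 1 else t1) = total + pvW b := by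
  have hk : pvClose (pvPartsOf b)
      = ((PySem.Chars.splitOn b ['-']).countP PySem.Chars.strIsdigit : Int) :=
    (pvSplitCount' b).symm
  have hlen : PySem.List.len ((PySem.Chars.splitOn b ['-']).filter
        (fun i => PySem.Chars.strIsdigit i))
      = pvClose (pvPartsOf b) := by
    rw [hk, PySem.List.len_eq, List.countP_eq_length_filter]
  by_cases hd : ('-' : Char) ∈ b
  · have hdash : pvDashOf b = true := by simp [pvDashOf, hd]
    have hw : b ∉ pvWordsChars := fun hm => pvNoDashWords b hm hd
    have hq1 : pvQ1 b = false := by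
      simp [pvQ1, pvStrIsdigitDash b hd, hw]
    have hq2 : pvQ2 b = (pvClose (pvPartsOf b) == 2) := by
      simp only [pvQ2, pvIsInDash, hlen]
      rw [pvBeqComm]
      simp [hd]
    simp only [pvW, hq1, hq2, hdash, Bool.not_true, Bool.false_and, Bool.false_or,
      Bool.true_and, if_false]
    have hwc : pvWordsChars.contains b = false := by
      rw [Bool.eq_false_iff]; intro hcon; exact hw (by simpa using hcon)
    simp only [hwc, if_false]
    by_cases h2 : (pvClose (pvPartsOf b) == 2) = true <;> simp [h2]
  · have hdash : pvDashOf b = false := by simp [pvDashOf, hd]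
    have hq2 : pvQ2 b = false := by
      simp only [pvQ2, pvIsInDash]
      simp [hd]
    have hk1 : pvClose (pvPartsOf b)
        = if PySem.Chars.strIsdigit b then 1 else 0 := by
      rw [hk, pvSplitNoDash' b hd]
      by_cases hs : PySem.Chars.strIsdigit b = true <;> simp [hs]
    have hq1d : (pvClose (pvPartsOf b) == 1) = PySem.Chars.strIsdigit b := by
      rw [hk1]
      by_cases hs : PySem.Chars.strIsdigit b = true <;> simp [hs]
    simp only [pvW, pvQ1, hdash, hq2, hq1d, Bool.not_false, Bool.true_and,
      Bool.and_false, Bool.false_and, if_false]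
    by_cases hs : PySem.Chars.strIsdigit b = true <;> simp [hs] <;> split_ifs <;> omega

-- split₀.go accumulator
lemma pvGoAcc (cs : List Char) : ∀ cur acc, PySem.Chars.split₀.go cs cur acc
    = acc.reverse ++ PySem.Chars.split₀.go cs cur [] := by
  induction cs with
  | nil => intro cur acc; simp only [PySem.Chars.split₀.go]; split <;> simp
  | cons c rest ih =>
      intro cur acc
      simp only [PySem.Chars.split₀.go]
      split
      · split
        · exact ih _ _
        · rw [ih [] (cur.reverse :: acc), ih [] [cur.reverse]]; simp
      · exact ih _ _

lemma pvStepNonspace (total : Int) (b : List Char) (ch : Char)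
    (hsp : PySem.Chars.isspace ch = false) :
    pvStep (pvMk total b) ch = pvMk total (b ++ [ch]) := by
  have hparts : pvPartsOf (b ++ [ch]) = pvPartStep (pvPartsOf b) ch := by
    simp [pvPartsOf, List.foldl_append]
  by_cases hc : ch = '-'
  · subst hc
    simp only [pvStep, pvMk, hsp, Bool.false_eq_true, if_false, beq_self_eq_true, if_true,
      hparts, pvPartStep, pvDashOf]
    simp [List.contains_append]
  · simp only [pvStep, pvMk, hsp, Bool.false_eq_true, if_false, hparts, pvPartStep,
      pvDashOf]
    rw [if_neg (by simp [hc])]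
    have hc' : ¬ ('-' : Char) = ch := fun h => hc h.symm
    simp [List.contains_append, hc, hc']

lemma pvStepSpace (total : Int) (b : List Char) (ch : Char)
    (hsp : PySem.Chars.isspace ch = true) :
    pvStep (pvMk total b) ch = pvMk (total + if b = [] then 0 else pvW b) [] := by
  by_cases hb : b = []
  · subst hb
    simp [pvStep, pvMk, hsp, pvDashOf, pvPartsOf]
  · have hbe : b.isEmpty = false := by simpa [List.isEmpty_iff] using hb
    have hclose : ∀ p : Int × Int × Bool,
        pvClose p = if p.2.2 && decide (0 < p.2.1) then p.1 + 1 else p.1 := by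
      rintro ⟨x, y, z⟩; rfl
    have hbump := pvBump b hb total
    simp only [hclose] at hbump
    simp only [pvStep, pvMk, hsp, if_true, hbe, Bool.false_eq_true, if_false]
    congr 1
    · rw [if_neg hb]; exact hbump

-- the scan over cs ++ [' '] from a mid-token state adds A's weights of the tokens
lemma pvMain : ∀ (cs : List Char) (total : Int) (b : List Char),
    ((cs ++ [' ']).foldl pvStep (pvMk total b)).total
      = total + ((PySem.Chars.split₀.go cs b.reverse []).map pvW).sum := by
  intro cs
  induction cs with
  | nil =>
      intro total b
      rw [List.nil_append, List.foldl_cons, List.foldl_nil,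
        pvStepSpace total b ' ' (by decide)]
      simp only [PySem.Chars.split₀.go]
      by_cases hb : b = []
      · subst hb; simp [pvMk]
      · have : (b.reverse).isEmpty = false := by simpa [List.isEmpty_iff] using hb
        simp [pvMk, this, hb]
  | cons c rest ih =>
      intro total b
      rw [List.cons_append, List.foldl_cons]
      by_cases hsp : PySem.Chars.isspace c = true
      · rw [pvStepSpace total b c hsp, ih]
        simp only [PySem.Chars.split₀.go, hsp, if_true]
        by_cases hb : b = []
        · subst hb; simp
        · have hbe : (b.reverse).isEmpty = false := by simpa [List.isEmpty_iff] using hb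
          simp only [hbe, Bool.false_eq_true, if_false]
          rw [pvGoAcc rest [] [b.reverse.reverse]]
          simp [hb]
          omega
      · rw [pvStepNonspace total b c (by simpa using hsp), ih]
        simp only [PySem.Chars.split₀.go, hsp]
        simp [List.reverse_append]

-- word membership transfers between the String and char-list word lists
lemma pvContainsWords (s : String) :
    pvWordsChars.contains s.toList = pvNumberWords.contains s := by
  rw [Bool.eq_iff_iff]
  simp [pvWordsChars, pvNumberWords, ← String.toList_inj]

lemma pvQ1_toList (s : String) : pvQ1 s.toList = pvP1 s := by
  simp only [pvQ1, pvP1, PySem.Str.strIsdigit_eq, pvContainsWords]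

lemma pvQ2_toList (s : String) : pvQ2 s.toList = pvP2 s := by
  simp [pvQ2, pvP2, PySem.Str.isIn_eq, show ("-" : String).toList = ['-'] from rfl]

-- A's value as two token counts
lemma pvA_eq (p : String) :
    n_numbers p = ((PySem.Str.split₀ p).countP pvP1 : Int)
      + ((PySem.Str.split₀ p).countP pvP2 : Int) := by
  unfold n_numbers
  simp only [List.filter_filter, PySem.List.len_eq]
  rw [← List.countP_eq_length_filter, ← List.countP_eq_length_filter]
  congr 2
  apply List.countP_congr
  intro s _
  simp [pvP2, PySem.List.len_eq]
  tauto

-- ===== VERDICT (by name: the statement is the Claim_ definition above) =====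
theorem n_numbers_spec : Claim_equal_n_numbers := by
  intro p _
  unfold Spec_n_numbers
  have hinit : (⟨0, [], false, 0, 0, true⟩ : PvSt) = pvMk 0 [] := rfl
  have hB : n_numbers_alt p = ((PySem.Chars.split₀ p.toList).map pvW).sum := by
    unfold n_numbers_alt
    rw [hinit, pvMain p.toList 0 []]
    simp [PySem.Chars.split₀]
  rw [pvA_eq, hB, ← PySem.Str.split₀_map_toList, List.map_map]
  have hw : ((PySem.Str.split₀ p).map (pvW ∘ String.toList))
      = (PySem.Str.split₀ p).map (fun s => (if pvP1 s = true then 1 else 0)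
          + (if pvP2 s = true then (1 : Int) else 0)) := by
    apply List.map_congr_left
    intro s _
    simp [pvW, pvQ1_toList, pvQ2_toList]
  rw [hw, PySem.List.sum_map_add_int, PySem.List.sum_map_ite_one_zero,
    PySem.List.sum_map_ite_one_zero]
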